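-- pv_equiv track=rewrite | github.com/Hardeepsingh980/deecode.herokuapp.com | deecode/decorder.py | main_code
-- ===== SOURCE A (Python) =====
-- def main_code(in_):
--   def codes(l):
--     d = []
--     for code in l:
--       if code == "A":
--         d.append("2")
--       elif code == "B":
--         d.append("22")
--       elif code == "C":
--        d.append ("222")
--       elif code == "D":
--        d.append ("3")
--       elif code == "E":
--        d.append ("33")
--       elif code == "F":
--         d.append("333")
--       elif code == "G":
--         d.append("4")
--       elif code == "H":
--          d.append("44")
--       elif code == "I":
--         d.append("444")
--       elif code == "J":
--         d.append("5")
--       elif code == "K":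
--         d.append("55")
--       elif code == "L":
--         d.append("555")
--       elif code == "M":
--         d.append("6")
--       elif code == "N":
--         d.append("66")
--       elif code == "O":
--         d.append("666")
--       elif code == "P":
--          d.append("7")
--       elif code == "Q":
--        d.append ("77")
--       elif code == "R":
--         d.append("777")
--       elif code == "S":
--         d.append("7777")
--       elif code == "T":
--         d.append("8")
--       elif code == "U":
--         d.append("88")
--       elif code == "V":
--         d.append("888")
--       elif code == "W":
--         d.append("9")
--       elif code == "X":
--          d.append("99")
--       elif code == "Y":
--         d.append("999")
--       elif code == "Z":
--         d.append("9999")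
--       elif code == " ":
--          d.append("0,")
--    # ans = ''.join(d)
--     return d
--
--   input = in_
--   l1 = []
--
--   for i in input:
--      l1.append(i.upper())
--
--   l1.append(" ")
--
--   l2 = codes(l1)
--   l3 = []
--   for i in l2:
--      if l2[-1] == i:
--         l3.append(i)
--
--      else:
--         l3.append(i + ",")
--
--   ans = ''.join(l3)
--
--   return ans
-- ===== SOURCE B (Python) =====
-- T9 = {
--     "A": "2", "B": "22", "C": "222", "D": "3", "E": "33", "F": "333",
--     "G": "4", "H": "44", "I": "444", "J": "5", "K": "55", "L": "555",
--     "M": "6", "N": "66", "O": "666", "P": "7", "Q": "77", "R": "777",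
--     "S": "7777", "T": "8", "U": "88", "V": "888", "W": "9", "X": "99",
--     "Y": "999", "Z": "9999", " ": "0",
-- }
--
-- def main_code(in_):
--     out = []
--     for ch in in_:
--         code = T9.get(ch.upper())
--         if code is not None:
--             out.append(code + ",")
--     out.append("0,")
--     return "".join(out)
-- ===== Notes on version B (the rewrite author's own statement) =====
-- stated objective: simpler
-- what changed: A uppercases into one list, maps it through a 27-branch if/elif helper into a second list, then runs a separate pass comparing each element against the list's last element to decide commas; B is one table-driven loop that appends each recognized character's keypad code plus a comma directly, followed by the fixed trailing-space code, with no intermediate lists and no second pass.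
import Mathlib
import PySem

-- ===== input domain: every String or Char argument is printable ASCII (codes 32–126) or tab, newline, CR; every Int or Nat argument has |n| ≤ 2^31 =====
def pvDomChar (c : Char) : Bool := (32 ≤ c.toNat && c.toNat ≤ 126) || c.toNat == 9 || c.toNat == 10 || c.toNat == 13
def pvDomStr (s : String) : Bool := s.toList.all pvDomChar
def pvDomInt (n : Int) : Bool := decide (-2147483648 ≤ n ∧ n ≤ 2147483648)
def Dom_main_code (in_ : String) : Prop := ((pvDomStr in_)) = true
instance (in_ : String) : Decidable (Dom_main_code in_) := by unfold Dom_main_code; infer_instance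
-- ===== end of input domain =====

-- B replaces A's two intermediate lists and its separate trailing-element comma pass with a single
-- table-driven loop appending "digits," per recognized character plus a final "0," (objective: simpler).

-- ===== PORT A =====
-- the body of the if/elif chain inside A's helper codes()
def codesStep (d : List String) (code : Char) : List String :=
  if code = 'A' then d ++ ["2"]
  else if code = 'B' then d ++ ["22"]
  else if code = 'C' then d ++ ["222"]
  else if code = 'D' then d ++ ["3"]
  else if code = 'E' then d ++ ["33"]
  else if code = 'F' then d ++ ["333"]
  else if code = 'G' then d ++ ["4"]
  else if code = 'H' then d ++ ["44"]
  else if code = 'I' then d ++ ["444"]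
  else if code = 'J' then d ++ ["5"]
  else if code = 'K' then d ++ ["55"]
  else if code = 'L' then d ++ ["555"]
  else if code = 'M' then d ++ ["6"]
  else if code = 'N' then d ++ ["66"]
  else if code = 'O' then d ++ ["666"]
  else if code = 'P' then d ++ ["7"]
  else if code = 'Q' then d ++ ["77"]
  else if code = 'R' then d ++ ["777"]
  else if code = 'S' then d ++ ["7777"]
  else if code = 'T' then d ++ ["8"]
  else if code = 'U' then d ++ ["88"]
  else if code = 'V' then d ++ ["888"]
  else if code = 'W' then d ++ ["9"]
  else if code = 'X' then d ++ ["99"]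
  else if code = 'Y' then d ++ ["999"]
  else if code = 'Z' then d ++ ["9999"]
  else if code = ' ' then d ++ ["0,"]
  else d

def codesA (l : List Char) : List String :=
  l.foldl codesStep []

def main_code (in_ : String) : String :=
  let l1 := in_.toList.foldl (fun l1 i => l1 ++ [i.toUpper]) []
  let l1 := l1 ++ [' ']
  let l2 := codesA l1
  -- `l2[-1] == i` ported with pyGet?; the loop body runs only when l2 is nonempty, so pyGet? is exact here
  let l3 := l2.foldl (fun l3 i =>
    if PySem.List.pyGet? l2 (-1) = some i then l3 ++ [i] else l3 ++ [i ++ ","]) []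
  String.join l3

-- ===== PORT B =====
def t9B : PySem.Dict String String :=
  PySem.Dict.ofList [("A", "2"), ("B", "22"), ("C", "222"), ("D", "3"), ("E", "33"), ("F", "333"), ("G", "4"), ("H", "44"), ("I", "444"), ("J", "5"), ("K", "55"), ("L", "555"), ("M", "6"), ("N", "66"), ("O", "666"), ("P", "7"), ("Q", "77"), ("R", "777"), ("S", "7777"), ("T", "8"), ("U", "88"), ("V", "888"), ("W", "9"), ("X", "99"), ("Y", "999"), ("Z", "9999"), (" ", "0")]

def main_code_alt (in_ : String) : String :=
  let out := in_.toList.foldl (fun out ch =>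
    match t9B.get? (String.ofList [ch.toUpper]) with
    | some code => out ++ [code ++ ","]
    | none => out) []
  let out := out ++ ["0,"]
  String.join out

-- ===== PRECONDITION & SPEC =====
def Spec_main_code (in_ : String) (out : String) : Prop := out = main_code_alt in_
instance (in_ : String) (out : String) : Decidable (Spec_main_code in_ out) := by unfold Spec_main_code; infer_instance

-- ===== CLAIM (what is proved, stated in full; the proofs are below) =====
def Claim_equal_main_code : Prop := ∀ (in_ : String), Dom_main_code in_ → Spec_main_code in_ (main_code in_)

-- ===== LEMMAS AND PROOFS =====

-- option form of A's codes() chain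
def codeA? (code : Char) : Option String :=
  if code = 'A' then some "2"
  else if code = 'B' then some "22"
  else if code = 'C' then some "222"
  else if code = 'D' then some "3"
  else if code = 'E' then some "33"
  else if code = 'F' then some "333"
  else if code = 'G' then some "4"
  else if code = 'H' then some "44"
  else if code = 'I' then some "444"
  else if code = 'J' then some "5"
  else if code = 'K' then some "55"
  else if code = 'L' then some "555"
  else if code = 'M' then some "6"
  else if code = 'N' then some "66"
  else if code = 'O' then some "666"
  else if code = 'P' then some "7"
  else if code = 'Q' then some "77"
  else if code = 'R' then some "777"
  else if code = 'S' then some "7777"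
  else if code = 'T' then some "8"
  else if code = 'U' then some "88"
  else if code = 'V' then some "888"
  else if code = 'W' then some "9"
  else if code = 'X' then some "99"
  else if code = 'Y' then some "999"
  else if code = 'Z' then some "9999"
  else if code = ' ' then some "0,"
  else none

-- the comma pass of A, as a per-element function
def gA (i : String) : String := if "0," = i then i else i ++ ","

-- B's per-character contribution
def bContrib (ch : Char) : List String :=
  ((t9B.get? (String.ofList [ch.toUpper])).map (fun s => s ++ ",")).toList

theorem codesStep_eq (d : List String) (c : Char) :
    codesStep d c = d ++ (codeA? c).toList := by
  unfold codesStep codeA?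
  by_cases h0 : c = 'A'
  · subst h0; rfl
  rw [if_neg h0, if_neg h0]
  by_cases h1 : c = 'B'
  · subst h1; rfl
  rw [if_neg h1, if_neg h1]
  by_cases h2 : c = 'C'
  · subst h2; rfl
  rw [if_neg h2, if_neg h2]
  by_cases h3 : c = 'D'
  · subst h3; rfl
  rw [if_neg h3, if_neg h3]
  by_cases h4 : c = 'E'
  · subst h4; rfl
  rw [if_neg h4, if_neg h4]
  by_cases h5 : c = 'F'
  · subst h5; rfl
  rw [if_neg h5, if_neg h5]
  by_cases h6 : c = 'G'
  · subst h6; rfl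
  rw [if_neg h6, if_neg h6]
  by_cases h7 : c = 'H'
  · subst h7; rfl
  rw [if_neg h7, if_neg h7]
  by_cases h8 : c = 'I'
  · subst h8; rfl
  rw [if_neg h8, if_neg h8]
  by_cases h9 : c = 'J'
  · subst h9; rfl
  rw [if_neg h9, if_neg h9]
  by_cases h10 : c = 'K'
  · subst h10; rfl
  rw [if_neg h10, if_neg h10]
  by_cases h11 : c = 'L'
  · subst h11; rfl
  rw [if_neg h11, if_neg h11]
  by_cases h12 : c = 'M'
  · subst h12; rfl
  rw [if_neg h12, if_neg h12]
  by_cases h13 : c = 'N'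
  · subst h13; rfl
  rw [if_neg h13, if_neg h13]
  by_cases h14 : c = 'O'
  · subst h14; rfl
  rw [if_neg h14, if_neg h14]
  by_cases h15 : c = 'P'
  · subst h15; rfl
  rw [if_neg h15, if_neg h15]
  by_cases h16 : c = 'Q'
  · subst h16; rfl
  rw [if_neg h16, if_neg h16]
  by_cases h17 : c = 'R'
  · subst h17; rfl
  rw [if_neg h17, if_neg h17]
  by_cases h18 : c = 'S'
  · subst h18; rfl
  rw [if_neg h18, if_neg h18]
  by_cases h19 : c = 'T'
  · subst h19; rfl
  rw [if_neg h19, if_neg h19]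
  by_cases h20 : c = 'U'
  · subst h20; rfl
  rw [if_neg h20, if_neg h20]
  by_cases h21 : c = 'V'
  · subst h21; rfl
  rw [if_neg h21, if_neg h21]
  by_cases h22 : c = 'W'
  · subst h22; rfl
  rw [if_neg h22, if_neg h22]
  by_cases h23 : c = 'X'
  · subst h23; rfl
  rw [if_neg h23, if_neg h23]
  by_cases h24 : c = 'Y'
  · subst h24; rfl
  rw [if_neg h24, if_neg h24]
  by_cases h25 : c = 'Z'
  · subst h25; rfl
  rw [if_neg h25, if_neg h25]
  by_cases h26 : c = ' '
  · subst h26; rfl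
  rw [if_neg h26, if_neg h26]
  simp

theorem codesA_eq (l : List Char) :
    codesA l = l.flatMap (fun c => (codeA? c).toList) := by
  unfold codesA
  rw [show codesStep = fun d c => d ++ (codeA? c).toList from
        funext fun d => funext fun c => codesStep_eq d c]
  rw [PySem.List.foldl_append_eq_flatMap]
  simp

theorem t9B_mk : t9B = PySem.Dict.mk [("A", "2"), ("B", "22"), ("C", "222"), ("D", "3"), ("E", "33"), ("F", "333"), ("G", "4"), ("H", "44"), ("I", "444"), ("J", "5"), ("K", "55"), ("L", "555"), ("M", "6"), ("N", "66"), ("O", "666"), ("P", "7"), ("Q", "77"), ("R", "777"), ("S", "7777"), ("T", "8"), ("U", "88"), ("V", "888"), ("W", "9"), ("X", "99"), ("Y", "999"), ("Z", "9999"), (" ", "0")] := by decide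

theorem perChar (c : Char) :
    ((codeA? c.toUpper).toList).map gA = bContrib c := by
  unfold bContrib
  rw [t9B_mk]
  generalize c.toUpper = u
  unfold codeA?
  by_cases h0 : u = 'A'
  · subst h0; rfl
  rw [if_neg h0]
  by_cases h1 : u = 'B'
  · subst h1; rfl
  rw [if_neg h1]
  by_cases h2 : u = 'C'
  · subst h2; rfl
  rw [if_neg h2]
  by_cases h3 : u = 'D'
  · subst h3; rfl
  rw [if_neg h3]
  by_cases h4 : u = 'E'
  · subst h4; rfl
  rw [if_neg h4]
  by_cases h5 : u = 'F'
  · subst h5; rfl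
  rw [if_neg h5]
  by_cases h6 : u = 'G'
  · subst h6; rfl
  rw [if_neg h6]
  by_cases h7 : u = 'H'
  · subst h7; rfl
  rw [if_neg h7]
  by_cases h8 : u = 'I'
  · subst h8; rfl
  rw [if_neg h8]
  by_cases h9 : u = 'J'
  · subst h9; rfl
  rw [if_neg h9]
  by_cases h10 : u = 'K'
  · subst h10; rfl
  rw [if_neg h10]
  by_cases h11 : u = 'L'
  · subst h11; rfl
  rw [if_neg h11]
  by_cases h12 : u = 'M'
  · subst h12; rfl
  rw [if_neg h12]
  by_cases h13 : u = 'N'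
  · subst h13; rfl
  rw [if_neg h13]
  by_cases h14 : u = 'O'
  · subst h14; rfl
  rw [if_neg h14]
  by_cases h15 : u = 'P'
  · subst h15; rfl
  rw [if_neg h15]
  by_cases h16 : u = 'Q'
  · subst h16; rfl
  rw [if_neg h16]
  by_cases h17 : u = 'R'
  · subst h17; rfl
  rw [if_neg h17]
  by_cases h18 : u = 'S'
  · subst h18; rfl
  rw [if_neg h18]
  by_cases h19 : u = 'T'
  · subst h19; rfl
  rw [if_neg h19]
  by_cases h20 : u = 'U'
  · subst h20; rfl
  rw [if_neg h20]
  by_cases h21 : u = 'V'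
  · subst h21; rfl
  rw [if_neg h21]
  by_cases h22 : u = 'W'
  · subst h22; rfl
  rw [if_neg h22]
  by_cases h23 : u = 'X'
  · subst h23; rfl
  rw [if_neg h23]
  by_cases h24 : u = 'Y'
  · subst h24; rfl
  rw [if_neg h24]
  by_cases h25 : u = 'Z'
  · subst h25; rfl
  rw [if_neg h25]
  by_cases h26 : u = ' '
  · subst h26; rfl
  rw [if_neg h26]
  simp [PySem.Dict.get?_mk_cons, PySem.Dict.get?, String.ext_iff, Ne.symm h0, Ne.symm h1, Ne.symm h2, Ne.symm h3, Ne.symm h4, Ne.symm h5, Ne.symm h6, Ne.symm h7, Ne.symm h8, Ne.symm h9, Ne.symm h10, Ne.symm h11, Ne.symm h12, Ne.symm h13, Ne.symm h14, Ne.symm h15, Ne.symm h16, Ne.symm h17, Ne.symm h18, Ne.symm h19, Ne.symm h20, Ne.symm h21, Ne.symm h22, Ne.symm h23, Ne.symm h24, Ne.symm h25, Ne.symm h26]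

theorem core (chars : List Char) :
    ((chars.map Char.toUpper).flatMap (fun c => (codeA? c).toList)).map gA
      = chars.flatMap bContrib := by
  induction chars with
  | nil => rfl
  | cons c cs ih => simp only [List.map_cons, List.flatMap_cons, List.map_append, ih, perChar c]

theorem mainA_char (in_ : String) :
    main_code in_ = String.join
      (((in_.toList.map Char.toUpper ++ [' ']).flatMap (fun c => (codeA? c).toList)).map gA) := by
  simp only [main_code]
  rw [PySem.List.foldl_append_singleton_eq_map, List.nil_append, codesA_eq]
  have hsplit : (in_.toList.map Char.toUpper ++ [' ']).flatMap (fun c => (codeA? c).toList)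
      = (in_.toList.map Char.toUpper).flatMap (fun c => (codeA? c).toList) ++ ["0,"] := by
    rw [List.flatMap_append]; rfl
  rw [hsplit]
  rw [PySem.List.pyGet?_neg_one_append_singleton]
  rw [show (fun (l3 : List String) (i : String) =>
        if some "0," = some i then l3 ++ [i] else l3 ++ [i ++ ","])
      = fun l3 i => l3 ++ [gA i] from funext fun l3 => funext fun i => by
        unfold gA; by_cases h : ("0," : String) = i
        · simp [h]
        · simp [h]]
  rw [PySem.List.foldl_append_singleton_eq_map, List.nil_append, ← hsplit]

theorem mainB_char (in_ : String) :
    main_code_alt in_ = String.join (in_.toList.flatMap bContrib ++ ["0,"]) := by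
  simp only [main_code_alt]
  rw [show (fun (out : List String) (ch : Char) =>
        match t9B.get? (String.ofList [ch.toUpper]) with
        | some code => out ++ [code ++ ","]
        | none => out)
      = fun out ch => out ++ bContrib ch from funext fun out => funext fun ch => by
        unfold bContrib
        cases t9B.get? (String.ofList [ch.toUpper]) <;> simp]
  rw [PySem.List.foldl_append_eq_flatMap, List.nil_append]

-- ===== VERDICT (by name: the statement is the Claim_ definition above) =====
theorem main_code_spec : Claim_equal_main_code := by
  intro in_ _
  unfold Spec_main_code
  rw [mainA_char, mainB_char]
  have hsplit : (in_.toList.map Char.toUpper ++ [' ']).flatMap (fun c => (codeA? c).toList)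
      = (in_.toList.map Char.toUpper).flatMap (fun c => (codeA? c).toList) ++ ["0,"] := by
    rw [List.flatMap_append]; rfl
  rw [hsplit, List.map_append, core]
  rfl
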